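-- pv_equiv track=rewrite | github.com/mortyc126-debug/SHA | nk_amplification.py | sha_states
-- ===== SOURCE A (Python) =====
-- MASK32 = 0xFFFFFFFF
--
-- K=[0x428a2f98,0x71374491,0xb5c0fbcf,0xe9b5dba5,0x3956c25b,0x59f111f1,0x923f82a4,0xab1c5ed5,0xd807aa98,0x12835b01,0x243185be,0x550c7dc3,0x72be5d74,0x80deb1fe,0x9bdc06a7,0xc19bf174,0xe49b69c1,0xefbe4786,0x0fc19dc6,0x240ca1cc,0x2de92c6f,0x4a7484aa,0x5cb0a9dc,0x76f988da,0x983e5152,0xa831c66d,0xb00327c8,0xbf597fc7,0xc6e00bf3,0xd5a79147,0x06ca6351,0x14292967,0x27b70a85,0x2e1b2138,0x4d2c6dfc,0x53380d13,0x650a7354,0x766a0abb,0x81c2c92e,0x92722c85,0xa2bfe8a1,0xa81a664b,0xc24b8b70,0xc76c51a3,0xd192e819,0xd6990624,0xf40e3585,0x106aa070,0x19a4c116,0x1e376c08,0x2748774c,0x34b0bcb5,0x391c0cb3,0x4ed8aa4a,0x5b9cca4f,0x682e6ff3,0x748f82ee,0x78a5636f,0x84c87814,0x8cc70208,0x90b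efffa,0xa4506ceb,0xbef9a3f7,0xc67178f2]
--
-- IV=[0x6a09e667,0xbb67ae85,0x3c6ef372,0xa54ff53a,0x510e527f,0x9b05688c,0x1f83d9ab,0x5be0cd19]
--
-- def rotr(x,n):return((x>>n)|(x<<(32-n)))&MASK32
--
-- def ssig0(x):return rotr(x,7)^rotr(x,18)^(x>>3)
--
-- def ssig1(x):return rotr(x,17)^rotr(x,19)^(x>>10)
--
-- def sig0(x):return rotr(x,2)^rotr(x,13)^rotr(x,22)
--
-- def sig1(x):return rotr(x,6)^rotr(x,11)^rotr(x,25)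
--
-- def ch(e,f,g):return(e&f)^(~e&g)&MASK32
--
-- def maj(a,b,c):return(a&b)^(a&c)^(b&c)
--
-- def sha_states(M):
--     W=list(M)+[0]*(64-len(M))
--     for i in range(16,64):W[i]=(ssig1(W[i-2])+W[i-7]+ssig0(W[i-15])+W[i-16])&MASK32
--     a,b,c,d,e,f,g,h=IV
--     ss=[(a,b,c,d,e,f,g,h)]
--     for r in range(64):
--         T1=(h+sig1(e)+ch(e,f,g)+K[r]+W[r])&MASK32;T2=(sig0(a)+maj(a,b,c))&MASK32
--         h,g,f=g,f,e;e=(d+T1)&MASK32;d,c,b=c,b,a;a=(T1+T2)&MASK32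
--         ss.append((a,b,c,d,e,f,g,h))
--     return ss
-- ===== SOURCE B (Python) =====
-- MASK32 = 0xFFFFFFFF
--
-- K=[0x428a2f98,0x71374491,0xb5c0fbcf,0xe9b5dba5,0x3956c25b,0x59f111f1,0x923f82a4,0xab1c5ed5,0xd807aa98,0x12835b01,0x243185be,0x550c7dc3,0x72be5d74,0x80deb1fe,0x9bdc06a7,0xc19bf174,0xe49b69c1,0xefbe4786,0x0fc19dc6,0x240ca1cc,0x2de92c6f,0x4a7484aa,0x5cb0a9dc,0x76f988da,0x983e5152,0xa831c66d,0xb00327c8,0xbf597fc7,0xc6e00bf3,0xd5a79147,0x06ca6351,0x14292967,0x27b70a85,0x2e1b2138,0x4d2c6dfc,0x53380d13,0x650a7354,0x766a0abb,0x81c2c92e,0x92722c85,0xa2bfe8a1,0xa81a664b,0xc24b8b70,0xc76c51a3,0xd192e819,0xd6990624,0xf40e3585,0x106aa070,0x19a4c116,0x1e376c08,0x2748774c,0x34b0bcb5,0x391c0cb3,0x4ed8aa4a,0x5b9cca4f,0x682e6ff3,0x748f82ee,0x78a5636f,0x84c87814,0x8cc70208,0x90befffa,0xa4506ceb,0xb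ef9a3f7,0xc67178f2]
--
-- IV=[0x6a09e667,0xbb67ae85,0x3c6ef372,0xa54ff53a,0x510e527f,0x9b05688c,0x1f83d9ab,0x5be0cd19]
--
-- def rotr(x,n):return((x>>n)|(x<<(32-n)))&MASK32
--
-- def ssig0(x):return rotr(x,7)^rotr(x,18)^(x>>3)
--
-- def ssig1(x):return rotr(x,17)^rotr(x,19)^(x>>10)
--
-- def sig0(x):return rotr(x,2)^rotr(x,13)^rotr(x,22)
--
-- def sig1(x):return rotr(x,6)^rotr(x,11)^rotr(x,25)
--
-- def ch(e,f,g):return(e&f)^(~e&g)&MASK32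
--
-- def maj(a,b,c):return(a&b)^(a&c)^(b&c)
--
-- def _round(state, r, w):
--     a,b,c,d,e,f,g,h = state
--     T1=(h+sig1(e)+ch(e,f,g)+K[r]+w)&MASK32
--     T2=(sig0(a)+maj(a,b,c))&MASK32
--     return ((T1+T2)&MASK32, a, b, c, (d+T1)&MASK32, e, f, g)
--
-- def sha_states(M):
--     # rolling 16-word schedule window instead of a precomputed 64-word array,
--     # fused with the compression loop
--     win = (list(M)+[0]*16)[:16]
--     state = tuple(IV)
--     ss = [state]
--     for r in range(64):
--         if r < 16:
--             w = win[r]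
--         else:
--             w = (ssig1(win[14]) + win[9] + ssig0(win[1]) + win[0]) & MASK32
--             win = win[1:] + [w]
--         state = _round(state, r, w)
--         ss.append(state)
--     return ss
-- ===== Notes on version B (the rewrite author's own statement) =====
-- stated objective: alternative
-- what changed: Replaces the precomputed 64-word message-schedule array (separate expansion loop, then compression loop indexing into it) with a 16-word sliding window that generates each schedule word on the fly inside a single fused compression loop, cutting the working state from 64 words to 16.
import Mathlib
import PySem

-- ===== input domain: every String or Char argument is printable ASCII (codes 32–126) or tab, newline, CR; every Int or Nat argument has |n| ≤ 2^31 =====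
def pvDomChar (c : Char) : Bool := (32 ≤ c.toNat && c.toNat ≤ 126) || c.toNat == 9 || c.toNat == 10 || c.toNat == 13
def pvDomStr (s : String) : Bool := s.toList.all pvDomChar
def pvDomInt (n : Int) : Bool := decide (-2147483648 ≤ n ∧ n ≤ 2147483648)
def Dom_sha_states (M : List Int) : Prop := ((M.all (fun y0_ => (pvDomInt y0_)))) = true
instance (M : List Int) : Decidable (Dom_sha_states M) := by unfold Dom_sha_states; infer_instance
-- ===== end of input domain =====

-- B replaces A's precomputed 64-word schedule array by a 16-word sliding window fused into the
-- single compression loop (alternative decomposition, same 64 rounds).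

-- shared constants and helpers (identical Python source in Source A and Source B)
def pvMASK32 : Int := 0xFFFFFFFF

def pvK : List Int := [0x428a2f98,0x71374491,0xb5c0fbcf,0xe9b5dba5,0x3956c25b,0x59f111f1,0x923f82a4,0xab1c5ed5,0xd807aa98,0x12835b01,0x243185be,0x550c7dc3,0x72be5d74,0x80deb1fe,0x9bdc06a7,0xc19bf174,0xe49b69c1,0xefbe4786,0x0fc19dc6,0x240ca1cc,0x2de92c6f,0x4a7484aa,0x5cb0a9dc,0x76f988da,0x983e5152,0xa831c66d,0xb00327c8,0xbf597fc7,0xc6e00bf3,0xd5a79147,0x06ca6351,0x14292967,0x27b70a85,0x2e1b2138,0x4d2c6dfc,0x53380d13,0x650a7354,0x766a0abb,0x81c2c92e,0x92722c85,0xa2bfe8a1,0xa81a664b,0xc24b8b70,0xc76c51a3,0xd192e819,0xd6990624,0xf40e3585,0x106aa070,0x19a4c116,0x1e376c08,0x2748774c,0x34b0bcb5,0x391c0cb3,0x4ed8aa4a,0x5b9cca4f,0x682e6ff3,0x748f82ee,0x78a5636f,0x84c87814,0x8cc70208,0x90befffa,0xa4506ceb,0xbef9a3f7,0xc67178f2]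

-- a,b,c,d,e,f,g,h = IV
def pvInit : Int × Int × Int × Int × Int × Int × Int × Int :=
  (0x6a09e667,0xbb67ae85,0x3c6ef372,0xa54ff53a,0x510e527f,0x9b05688c,0x1f83d9ab,0x5be0cd19)

-- rotr(x,n)=((x>>n)|(x<<(32-n)))&MASK32 ; Lean's >>>,<<< on Int are Python's shifts (also on negatives)
def pvRotr (x : Int) (n : Nat) : Int :=
  PySem.Int.band (PySem.Int.bor (x >>> n) (x <<< (32 - n))) pvMASK32

def pvSsig0 (x : Int) : Int := PySem.Int.bxor (PySem.Int.bxor (pvRotr x 7) (pvRotr x 18)) (x >>> 3)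
def pvSsig1 (x : Int) : Int := PySem.Int.bxor (PySem.Int.bxor (pvRotr x 17) (pvRotr x 19)) (x >>> 10)
def pvSig0 (x : Int) : Int := PySem.Int.bxor (PySem.Int.bxor (pvRotr x 2) (pvRotr x 13)) (pvRotr x 22)
def pvSig1 (x : Int) : Int := PySem.Int.bxor (PySem.Int.bxor (pvRotr x 6) (pvRotr x 11)) (pvRotr x 25)
-- ch: Python precedence makes it (e&f) ^ ((~e&g)&MASK32)
def pvCh (e f g : Int) : Int :=
  PySem.Int.bxor (PySem.Int.band e f) (PySem.Int.band (PySem.Int.band (Int.not e) g) pvMASK32)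
def pvMaj (a b c : Int) : Int :=
  PySem.Int.bxor (PySem.Int.bxor (PySem.Int.band a b) (PySem.Int.band a c)) (PySem.Int.band b c)

-- ===== PORT A =====
-- W=list(M)+[0]*(64-len(M))  ([0]*negative is [], like Nat subtraction here)
def pvW0 (M : List Int) : List Int := M ++ List.replicate (64 - M.length) 0

-- body of `for i in range(16,64): W[i]=...`; all reads W[i-2],W[i-7],W[i-15],W[i-16] are in
-- range (indices < i < len(W)), so getD is exact for Python's W[...]
def pvSchedStep (W : List Int) (i : Nat) : List Int :=
  W.set i (PySem.Int.band
    (pvSsig1 (W.getD (i-2) 0) + W.getD (i-7) 0 + pvSsig0 (W.getD (i-15) 0) + W.getD (i-16) 0)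
    pvMASK32)

-- body of `for r in range(64)`: state is ((a,b,c,d,e,f,g,h), ss); K[r] and W[r] are in range
def pvStepA (W : List Int)
    (acc : (Int × Int × Int × Int × Int × Int × Int × Int) × List (Int × Int × Int × Int × Int × Int × Int × Int))
    (r : Nat) :
    (Int × Int × Int × Int × Int × Int × Int × Int) × List (Int × Int × Int × Int × Int × Int × Int × Int) :=
  let (st, ss) := acc
  let (a, b, c, d, e, f, g, h) := st
  let T1 := PySem.Int.band (h + pvSig1 e + pvCh e f g + pvK.getD r 0 + W.getD r 0) pvMASK32
  let T2 := PySem.Int.band (pvSig0 a + pvMaj a b c) pvMASK32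
  let st' := (PySem.Int.band (T1 + T2) pvMASK32, a, b, c, PySem.Int.band (d + T1) pvMASK32, e, f, g)
  (st', ss ++ [st'])

def sha_states (M : List Int) : List (Int × Int × Int × Int × Int × Int × Int × Int) :=
  let W := (List.range' 16 48).foldl pvSchedStep (pvW0 M)   -- for i in range(16,64)
  ((List.range 64).foldl (pvStepA W) (pvInit, [pvInit])).2

-- ===== PORT B =====
-- _round(state, r, w)
def pvRound (st : Int × Int × Int × Int × Int × Int × Int × Int) (r : Nat) (w : Int) :
    Int × Int × Int × Int × Int × Int × Int × Int :=
  let (a, b, c, d, e, f, g, h) := st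
  let T1 := PySem.Int.band (h + pvSig1 e + pvCh e f g + pvK.getD r 0 + w) pvMASK32
  let T2 := PySem.Int.band (pvSig0 a + pvMaj a b c) pvMASK32
  (PySem.Int.band (T1 + T2) pvMASK32, a, b, c, PySem.Int.band (d + T1) pvMASK32, e, f, g)

-- win = (list(M)+[0]*16)[:16]
def pvWin0 (M : List Int) : List Int := (M ++ List.replicate 16 0).take 16

-- body of B's single fused loop; state is (win, state, ss); window reads are in range (len(win)=16)
def pvStepB
    (acc : List Int × (Int × Int × Int × Int × Int × Int × Int × Int) × List (Int × Int × Int × Int × Int × Int × Int × Int))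
    (r : Nat) :
    List Int × (Int × Int × Int × Int × Int × Int × Int × Int) × List (Int × Int × Int × Int × Int × Int × Int × Int) :=
  let (win, st, ss) := acc
  if r < 16 then
    let w := win.getD r 0
    let st' := pvRound st r w
    (win, st', ss ++ [st'])
  else
    let w := PySem.Int.band
      (pvSsig1 (win.getD 14 0) + win.getD 9 0 + pvSsig0 (win.getD 1 0) + win.getD 0 0) pvMASK32
    let st' := pvRound st r w
    (win.drop 1 ++ [w], st', ss ++ [st'])   -- win = win[1:] + [w]

def sha_states_alt (M : List Int) : List (Int × Int × Int × Int × Int × Int × Int × Int) :=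
  ((List.range 64).foldl pvStepB (pvWin0 M, pvInit, [pvInit])).2.2

-- ===== PRECONDITION & SPEC =====
def Spec_sha_states (M : List Int) (out : List (Int × Int × Int × Int × Int × Int × Int × Int)) : Prop := out = sha_states_alt M
instance (M : List Int) (out : List (Int × Int × Int × Int × Int × Int × Int × Int)) : Decidable (Spec_sha_states M out) := by
  unfold Spec_sha_states
  have h7 : DecidableEq (Int × Int × Int × Int × Int × Int × Int) := instDecidableEqProd
  have h8 : DecidableEq (Int × Int × Int × Int × Int × Int × Int × Int) := instDecidableEqProd
  infer_instance

-- ===== CLAIM (what is proved, stated in full; the proofs are below) =====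
def Claim_equal_sha_states : Prop := ∀ (M : List Int), Dom_sha_states M → Spec_sha_states M (sha_states M)

-- ===== LEMMAS AND PROOFS =====

-- the mathematical schedule word: W[j] after A's expansion loop
def pvWspec (M : List Int) : Nat → Int
  | j =>
    if _h : j < 16 then (pvW0 M).getD j 0
    else PySem.Int.band
      (pvSsig1 (pvWspec M (j-2)) + pvWspec M (j-7) + pvSsig0 (pvWspec M (j-15)) + pvWspec M (j-16))
      pvMASK32
  termination_by j => j
  decreasing_by all_goals omega

lemma pvW0_length_ge (M : List Int) : 64 ≤ (pvW0 M).length := by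
  simp [pvW0]; omega

-- B's initial window agrees with A's initial array on the first 16 slots
lemma pvWin0_getD (M : List Int) (t : Nat) (ht : t < 16) :
    (pvWin0 M).getD t 0 = (pvW0 M).getD t 0 := by
  simp only [pvWin0, pvW0, List.getD_eq_getElem?_getD, List.getElem?_take, List.getElem?_append,
    List.getElem?_replicate, if_pos ht]
  by_cases hm : t < M.length
  · simp [hm]
  · have h1 : t - M.length < 16 := by omega
    have h2 : t - M.length < 64 - M.length := by omega
    simp [hm, h1, h2]

lemma pvWin0_length (M : List Int) : (pvWin0 M).length = 16 := by
  simp [pvWin0]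

-- A's expansion loop computes pvWspec
lemma pvSched_invariant (M : List Int) :
    ∀ k, k ≤ 48 →
      ((List.range' 16 k).foldl pvSchedStep (pvW0 M)).length = (pvW0 M).length ∧
      ∀ j, j < 16 + k → ((List.range' 16 k).foldl pvSchedStep (pvW0 M)).getD j 0 = pvWspec M j := by
  intro k
  induction k with
  | zero =>
    intro _
    refine ⟨rfl, ?_⟩
    intro j hj
    rw [pvWspec, dif_pos (show j < 16 by omega)]
    rfl
  | succ k ih =>
    intro hk
    obtain ⟨hlen, hval⟩ := ih (by omega)
    have hconc : List.range' 16 (k+1) = List.range' 16 k ++ [16 + k] := by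
      rw [List.range'_1_concat]
    set Wk := (List.range' 16 k).foldl pvSchedStep (pvW0 M) with hWk
    have hfold : (List.range' 16 (k+1)).foldl pvSchedStep (pvW0 M) = pvSchedStep Wk (16 + k) := by
      rw [hconc, List.foldl_append]; rfl
    have hlen64 : 64 ≤ Wk.length := hlen ▸ pvW0_length_ge M
    have hset_len : (pvSchedStep Wk (16 + k)).length = Wk.length := by
      simp [pvSchedStep]
    refine ⟨by rw [hfold, hset_len, hlen], ?_⟩
    intro j hj
    rw [hfold]
    have hv : pvSchedStep Wk (16 + k) = Wk.set (16 + k)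
        (PySem.Int.band
          (pvSsig1 (pvWspec M (16 + k - 2)) + pvWspec M (16 + k - 7) +
            pvSsig0 (pvWspec M (16 + k - 15)) + pvWspec M (16 + k - 16)) pvMASK32) := by
      simp only [pvSchedStep]
      rw [hval (16 + k - 2) (by omega), hval (16 + k - 7) (by omega),
        hval (16 + k - 15) (by omega), hval (16 + k - 16) (by omega)]
    rw [hv]
    by_cases hje : j = 16 + k
    · subst hje
      rw [List.getD_eq_getElem?_getD, List.getElem?_set,
        if_pos (rfl : 16 + k = 16 + k), if_pos (by omega : 16 + k < Wk.length)]
      conv_rhs => rw [pvWspec]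
      rw [dif_neg (by omega : ¬ (16 + k < 16))]
      rfl
    · rw [List.getD_eq_getElem?_getD, List.getElem?_set, if_neg (by omega : ¬ 16 + k = j),
        ← List.getD_eq_getElem?_getD]
      exact hval j (by omega)

-- the fused loop of B tracks A's two loops round by round
lemma pvMain (M : List Int) :
    ∀ n, n ≤ 64 →
      ((List.range n).foldl (pvStepA ((List.range' 16 48).foldl pvSchedStep (pvW0 M))) (pvInit, [pvInit]) =
        (((List.range n).foldl pvStepB (pvWin0 M, pvInit, [pvInit])).2.1,
         ((List.range n).foldl pvStepB (pvWin0 M, pvInit, [pvInit])).2.2)) ∧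
      ((List.range n).foldl pvStepB (pvWin0 M, pvInit, [pvInit])).1.length = 16 ∧
      ∀ t, t < 16 →
        ((List.range n).foldl pvStepB (pvWin0 M, pvInit, [pvInit])).1.getD t 0 = pvWspec M (n - 16 + t) := by
  set W := (List.range' 16 48).foldl pvSchedStep (pvW0 M) with hW
  obtain ⟨-, hWval⟩ := pvSched_invariant M 48 (le_refl 48)
  rw [← hW] at hWval
  intro n
  induction n with
  | zero =>
    intro _
    refine ⟨rfl, pvWin0_length M, ?_⟩
    intro t ht
    show (pvWin0 M).getD t 0 = pvWspec M (0 - 16 + t)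
    rw [pvWin0_getD M t ht, (show (0:Nat) - 16 + t = t by omega), pvWspec, dif_pos ht]
  | succ n ih =>
    intro hn
    obtain ⟨hAB, hwlen, hwin⟩ := ih (by omega)
    set accB := (List.range n).foldl pvStepB (pvWin0 M, pvInit, [pvInit]) with haccB
    have hfB : (List.range (n+1)).foldl pvStepB (pvWin0 M, pvInit, [pvInit]) = pvStepB accB n := by
      rw [List.range_succ, List.foldl_append]; rfl
    have hfA : (List.range (n+1)).foldl (pvStepA W) (pvInit, [pvInit]) =
        pvStepA W ((List.range n).foldl (pvStepA W) (pvInit, [pvInit])) n := by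
      rw [List.range_succ, List.foldl_append]; rfl
    -- the schedule word B uses at round n is pvWspec M n = W.getD n 0
    have hwn : n < 64 := by omega
    have hWn : W.getD n 0 = pvWspec M n := hWval n (by omega)
    by_cases hr : n < 16
    · -- w = win[n]
      have hw : accB.1.getD n 0 = pvWspec M n := by
        have := hwin n hr
        rwa [Nat.sub_eq_zero_of_le (by omega : n ≤ 16), Nat.zero_add] at this
      refine ⟨?_, ?_, ?_⟩
      · rw [hfA, hfB, hAB]
        simp only [pvStepB, if_pos hr, hw]
        simp only [pvStepA, pvRound, hWn]
      · rw [hfB]; simp only [pvStepB, if_pos hr]; exact hwlen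
      · intro t ht
        rw [hfB]; simp only [pvStepB, if_pos hr]
        have := hwin t ht
        rw [Nat.sub_eq_zero_of_le (by omega : n ≤ 16), Nat.zero_add] at this
        rw [Nat.sub_eq_zero_of_le (by omega : n + 1 ≤ 16), Nat.zero_add]
        exact this
    · -- w computed from the window equals pvWspec M n
      have h14 : accB.1.getD 14 0 = pvWspec M (n - 2) := by
        have := hwin 14 (by omega); rwa [(by omega : n - 16 + 14 = n - 2)] at this
      have h9 : accB.1.getD 9 0 = pvWspec M (n - 7) := by
        have := hwin 9 (by omega); rwa [(by omega : n - 16 + 9 = n - 7)] at this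
      have h1 : accB.1.getD 1 0 = pvWspec M (n - 15) := by
        have := hwin 1 (by omega); rwa [(by omega : n - 16 + 1 = n - 15)] at this
      have h0 : accB.1.getD 0 0 = pvWspec M (n - 16) := by
        have := hwin 0 (by omega); rwa [Nat.add_zero] at this
      have hwval : PySem.Int.band
          (pvSsig1 (accB.1.getD 14 0) + accB.1.getD 9 0 + pvSsig0 (accB.1.getD 1 0) + accB.1.getD 0 0)
          pvMASK32 = pvWspec M n := by
        rw [h14, h9, h1, h0]
        conv_rhs => rw [pvWspec]
        simp only [dif_neg hr]
      refine ⟨?_, ?_, ?_⟩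
      · rw [hfA, hfB, hAB]
        simp only [pvStepB, if_neg hr, hwval]
        simp only [pvStepA, pvRound, hWn]
      · rw [hfB]
        simp only [pvStepB, if_neg hr]
        simp only [List.length_append, List.length_drop, hwlen, List.length_cons,
          List.length_nil]
      · intro t ht
        rw [hfB]
        simp only [pvStepB, if_neg hr, hwval]
        rw [List.getD_eq_getElem?_getD, List.getElem?_append, List.length_drop, hwlen]
        by_cases ht15 : t < 15
        · rw [if_pos ht15, List.getElem?_drop, ← List.getD_eq_getElem?_getD]
          have := hwin (1 + t) (by omega)
          rwa [(by omega : n - 16 + (1 + t) = n + 1 - 16 + t)] at this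
        · have ht' : t = 15 := by omega
          subst ht'
          rw [if_neg (by omega)]
          simp only [(by omega : 15 - 15 = 0), List.getElem?_cons_zero, Option.getD_some]
          rw [(by omega : n + 1 - 16 + 15 = n)]

-- ===== VERDICT (by name: the statement is the Claim_ definition above) =====
theorem sha_states_spec : Claim_equal_sha_states := by
  intro M _
  unfold Spec_sha_states sha_states sha_states_alt
  obtain ⟨hAB, -, -⟩ := pvMain M 64 (le_refl 64)
  show ((List.range 64).foldl (pvStepA ((List.range' 16 48).foldl pvSchedStep (pvW0 M))) (pvInit, [pvInit])).2 =
    ((List.range 64).foldl pvStepB (pvWin0 M, pvInit, [pvInit])).2.2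
  rw [hAB]
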